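-- pv_equiv track=rewrite | github.com/Suisan-neki/network-test | observer/collectors/interfaces.py | parse_default_route
-- ===== SOURCE A (Python) =====
-- def parse_default_route(output: str) -> dict[str, str]:
--     for raw_line in output.splitlines():
--         line = raw_line.strip()
--         if not line.startswith("default "):
--             continue
--
--         tokens = line.split()
--         route: dict[str, str] = {"raw": line}
--         if "via" in tokens:
--             idx = tokens.index("via")
--             if idx + 1 < len(tokens):
--                 route["via"] = tokens[idx + 1]
--         if "dev" in tokens:
--             idx = tokens.index("dev")
--             if idx + 1 < len(tokens):
--                 route["dev"] = tokens[idx + 1]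
--         return route
--
--     return {}
-- ===== SOURCE B (Python) =====
-- def parse_default_route(output: str) -> dict[str, str]:
--     for raw_line in output.splitlines():
--         line = raw_line.strip()
--         if line.startswith("default "):
--             # one pass over the tokens: a pending keyword is filled by the next
--             # token; each keyword is recorded only at its first occurrence
--             found: dict[str, str] = {}
--             pending = None
--             for tok in line.split():
--                 if pending is not None and pending not in found:
--                     found[pending] = tok
--                 pending = tok if tok in ("via", "dev") and tok not in found else None
--             route = {"raw": line}
--             if "via" in found:
--                 route["via"] = found["via"]
--             if "dev" in found:
--                 route["dev"] = found["dev"]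
--             return route
--     return {}
-- ===== Notes on version B (the rewrite author's own statement) =====
-- stated objective: alternative
-- what changed: A's per-keyword membership test + list.index + bounds-checked idx+1 lookup (one scan per keyword) is replaced by a single left-to-right state-machine pass over the tokens that fills a found-dict: a pending keyword is satisfied by the next token and each keyword is recorded only at its first occurrence; the route is then assembled by two dict lookups.
import Mathlib
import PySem

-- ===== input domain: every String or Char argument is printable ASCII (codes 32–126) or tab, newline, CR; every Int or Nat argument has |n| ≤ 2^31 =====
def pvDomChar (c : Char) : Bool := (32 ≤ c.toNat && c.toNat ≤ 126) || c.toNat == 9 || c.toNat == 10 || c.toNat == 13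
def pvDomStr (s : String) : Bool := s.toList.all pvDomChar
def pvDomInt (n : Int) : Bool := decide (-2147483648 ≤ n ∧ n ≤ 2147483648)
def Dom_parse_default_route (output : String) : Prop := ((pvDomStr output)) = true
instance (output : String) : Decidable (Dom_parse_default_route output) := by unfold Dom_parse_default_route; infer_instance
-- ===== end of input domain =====

-- B replaces A's per-keyword membership test + index + bounds-checked idx+1 lookup by a single
-- state-machine pass over the tokens filling a found-dict, then two lookups (objective: alternative).

-- ===== PORT A =====
-- the for-loop over output.splitlines(); 'tokens.index' is guarded by the 'in' test, so the
-- match on index? (none exactly when the token is absent) is the faithful transliteration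
def pdrLinesA : List (List Char) → List (String × String)
  | [] => []
  | rawLine :: rest =>
    let line := PySem.Chars.strip rawLine
    if !(PySem.Chars.startswith line ("default ".toList)) then pdrLinesA rest
    else
      let tokens := PySem.Chars.split₀ line
      let route : List (String × String) := [("raw", String.ofList line)]
      let route :=
        match PySem.List.index? tokens ("via".toList) with
        | some idx =>
          if idx + 1 < tokens.length then route ++ [("via", String.ofList (tokens.getD (idx + 1) []))]
          else route
        | none => route
      let route :=
        match PySem.List.index? tokens ("dev".toList) with
        | some idx =>
          if idx + 1 < tokens.length then route ++ [("dev", String.ofList (tokens.getD (idx + 1) []))]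
          else route
        | none => route
      route

def parse_default_route (output : String) : List (String × String) :=
  pdrLinesA (PySem.Chars.splitlines output.toList)

-- ===== PORT B =====
-- one iteration of Source B's token loop: fill the pending keyword with this token,
-- then set pending to this token iff it is an unrecorded keyword
def pdrStep (st : PySem.Dict (List Char) (List Char) × Option (List Char)) (tok : List Char) :
    PySem.Dict (List Char) (List Char) × Option (List Char) :=
  let found :=
    match st.2 with
    | some p => if !(st.1.contains p) then st.1.insert p tok else st.1
    | none => st.1
  let pending :=
    if (tok == "via".toList || tok == "dev".toList) && !(found.contains tok) then some tok
    else none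
  (found, pending)

def pdrLinesB : List (List Char) → List (String × String)
  | [] => []
  | rawLine :: rest =>
    let line := PySem.Chars.strip rawLine
    if PySem.Chars.startswith line ("default ".toList) then
      let found := ((PySem.Chars.split₀ line).foldl pdrStep (PySem.Dict.empty, none)).1
      let route : List (String × String) := [("raw", String.ofList line)]
      let route :=
        if found.contains ("via".toList) then
          route ++ [("via", String.ofList (found.getD ("via".toList) []))]
        else route
      let route :=
        if found.contains ("dev".toList) then
          route ++ [("dev", String.ofList (found.getD ("dev".toList) []))]
        else route
      route
    else pdrLinesB rest

def parse_default_route_alt (output : String) : List (String × String) :=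
  pdrLinesB (PySem.Chars.splitlines output.toList)

-- ===== PRECONDITION & SPEC =====
def Spec_parse_default_route (output : String) (out : List (String × String)) : Prop := out = parse_default_route_alt output
instance (output : String) (out : List (String × String)) : Decidable (Spec_parse_default_route output out) := by unfold Spec_parse_default_route; infer_instance

-- ===== CLAIM (what is proved, stated in full; the proofs are below) =====
def Claim_equal_parse_default_route : Prop := ∀ (output : String), Dom_parse_default_route output → Spec_parse_default_route output (parse_default_route output)

-- ===== LEMMAS AND PROOFS =====

-- A's extraction of the token after the first occurrence of k, as an Option
def pdrExtract (ts : List (List Char)) (k : List Char) : Option (List Char) :=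
  match PySem.List.index? ts k with
  | some i => ts[i + 1]?
  | none => none

lemma pdrExtract_cons_self (ts : List (List Char)) (k : List Char) :
    pdrExtract (k :: ts) k = ts.head? := by
  rw [pdrExtract, PySem.List.index?_cons_self]
  simp [List.head?_eq_getElem?]

lemma pdrExtract_cons_of_ne (t : List Char) (ts : List (List Char)) (k : List Char) (h : t ≠ k) :
    pdrExtract (t :: ts) k = pdrExtract ts k := by
  rw [pdrExtract, pdrExtract, PySem.List.index?_cons_of_ne _ h]
  cases PySem.List.index? ts k <;> simp

-- the state machine's found-dict answers a keyword lookup exactly like pdrExtract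
lemma pdr_fold_get (ts : List (List Char)) (f : PySem.Dict (List Char) (List Char))
    (p : Option (List Char)) (k : List Char)
    (hk : k = "via".toList ∨ k = "dev".toList) :
    ((ts.foldl pdrStep (f, p)).1).get? k =
      match f.get? k with
      | some v => some v
      | none => if p = some k then ts.head? else pdrExtract ts k := by
  induction ts generalizing f p with
  | nil =>
    cases h : f.get? k with
    | some v => simp [h]
    | none => simp [h, pdrExtract, PySem.List.index?_eq_idxOf?]
  | cons t ts ih =>
    rw [List.foldl_cons]
    cases hp : p with
    | none =>
      have hstep : pdrStep (f, none) t =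
          (f, if ((t == "via".toList || t == "dev".toList) && !(f.contains t)) = true
              then some t else none) := rfl
      rw [hstep, ih]
      cases hf : f.get? k with
      | some v => simp
      | none =>
        have hcon : f.contains k = false := by
          rw [PySem.Dict.contains_eq_isSome_get?, hf]; rfl
        by_cases ht : t = k
        · rw [ht]
          have hcond : ((k == "via".toList || k == "dev".toList) && !(f.contains k)) = true := by
            rw [hcon]; rcases hk with h | h <;> simp [h]
          rw [if_pos hcond]
          simp [pdrExtract_cons_self]
        · have h1 := pdrExtract_cons_of_ne t ts k ht
          by_cases hc : ((t == "via".toList || t == "dev".toList) && !(f.contains t)) = true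
          · rw [if_pos hc]
            simp [ht, h1]
          · rw [if_neg hc]
            simp [h1]
    | some q =>
      by_cases hq : q = k
      · cases hf : f.get? k with
        | some v =>
          have hcq : f.contains q = true := by
            rw [hq, PySem.Dict.contains_eq_isSome_get?, hf]; rfl
          have hstep : pdrStep (f, some q) t =
              (f, if ((t == "via".toList || t == "dev".toList) && !(f.contains t)) = true
                  then some t else none) := by
            simp [pdrStep, hcq]
          rw [hstep, ih]
          simp [hf]
        | none =>
          have hcq : f.contains q = false := by
            rw [hq, PySem.Dict.contains_eq_isSome_get?, hf]; rfl
          have hstep : pdrStep (f, some q) t =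
              (f.insert q t,
               if ((t == "via".toList || t == "dev".toList) && !((f.insert q t).contains t)) = true
               then some t else none) := by
            simp [pdrStep, hcq]
          rw [hstep, ih]
          simp [hq, List.head?]
      · have hins : ∀ v, (f.insert q v).get? k = f.get? k :=
          fun v => PySem.Dict.get?_insert_of_ne f v (Ne.symm hq)
        have hfk : ∀ v, ((pdrStep (f, some q) v).1).get? k = f.get? k := by
          intro v; by_cases hcq : f.contains q = true <;> simp [pdrStep, hcq, hins]
        have hp2 : ∀ v, (pdrStep (f, some q) v).2 =
            (if ((v == "via".toList || v == "dev".toList)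
                  && !(((pdrStep (f, some q) v).1).contains v)) = true
             then some v else none) := by
          intro v; by_cases hcq : f.contains q = true <;> simp [pdrStep, hcq]
        rw [show pdrStep (f, some q) t
              = ((pdrStep (f, some q) t).1, (pdrStep (f, some q) t).2) from rfl, ih]
        rw [hfk t, hp2 t]
        cases hf : f.get? k with
        | some v => simp
        | none =>
          have hconk : ∀ v, ((pdrStep (f, some q) v).1).contains k = false := by
            intro v; rw [PySem.Dict.contains_eq_isSome_get?, hfk v, hf]; rfl
          by_cases ht : t = k
          · rw [ht]
            have hcond : ((k == "via".toList || k == "dev".toList)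
                && !(((pdrStep (f, some q) k).1).contains k)) = true := by
              rw [hconk k]; rcases hk with h | h <;> simp [h]
            rw [if_pos hcond]
            simp [hq, pdrExtract_cons_self]
          · have h1 := pdrExtract_cons_of_ne t ts k ht
            by_cases hc : ((t == "via".toList || t == "dev".toList)
                && !(((pdrStep (f, some q) t).1).contains t)) = true
            · rw [if_pos hc]
              simp [ht, hq, h1]
            · rw [if_neg hc]
              simp [hq, h1]

lemma pdr_found_get (tokens : List (List Char)) (k : List Char)
    (hk : k = "via".toList ∨ k = "dev".toList) :
    ((tokens.foldl pdrStep (PySem.Dict.empty, none)).1).get? k = pdrExtract tokens k := by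
  rw [pdr_fold_get tokens PySem.Dict.empty none k hk]
  simp [PySem.Dict.get?_empty]

-- A's guarded index extraction appends the same field as B's contains/getD lookup
lemma pdr_field_eq (tokens : List (List Char)) (found : PySem.Dict (List Char) (List Char))
    (k : List Char) (name : String) (r : List (String × String))
    (hget : found.get? k = pdrExtract tokens k) :
    (match PySem.List.index? tokens k with
     | some idx =>
       if idx + 1 < tokens.length then r ++ [(name, String.ofList (tokens.getD (idx + 1) []))]
       else r
     | none => r)
    = if found.contains k then r ++ [(name, String.ofList (found.getD k []))] else r := by
  cases hi : PySem.List.index? tokens k with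
  | none =>
    replace hget : found.get? k = none := by rw [hget, pdrExtract, hi]
    have : found.contains k = false := by
      rw [PySem.Dict.contains_eq_isSome_get?, hget]; rfl
    simp [this]
  | some i =>
    replace hget : found.get? k = tokens[i + 1]? := by rw [hget, pdrExtract, hi]
    cases hj : tokens[i + 1]? with
    | none =>
      rw [hj] at hget
      have hlen : ¬ (i + 1 < tokens.length) := by
        simpa using List.getElem?_eq_none_iff.mp hj
      have : found.contains k = false := by
        rw [PySem.Dict.contains_eq_isSome_get?, hget]; rfl
      simp [hlen, this]
    | some v =>
      rw [hj] at hget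
      have hlen : i + 1 < tokens.length := (List.getElem?_eq_some_iff.mp hj).1
      have hc : found.contains k = true := by
        rw [PySem.Dict.contains_eq_isSome_get?, hget]; rfl
      have hd : found.getD k [] = v := by rw [PySem.Dict.getD_eq_get?_getD, hget]; rfl
      have hv : tokens[i + 1] = v := by
        have h := hj; rw [List.getElem?_eq_getElem hlen] at h; exact Option.some.inj h
      simp [hlen, hc, hd, hv]

-- A's line loop equals B's line loop
lemma pdr_lines_eq (ls : List (List Char)) : pdrLinesA ls = pdrLinesB ls := by
  induction ls with
  | nil => rfl
  | cons rawLine rest ih =>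
    by_cases hs : PySem.Chars.startswith (PySem.Chars.strip rawLine) ("default ".toList) = true
    · simp only [pdrLinesA, pdrLinesB, hs, Bool.not_true, Bool.false_eq_true, if_false, if_true]
      rw [pdr_field_eq _ _ _ "via" _ (pdr_found_get _ _ (Or.inl rfl))]
      rw [pdr_field_eq _ _ _ "dev" _ (pdr_found_get _ _ (Or.inr rfl))]
    · simp only [Bool.not_eq_true] at hs
      simp only [pdrLinesA, pdrLinesB, hs, Bool.not_false, if_true, Bool.false_eq_true, if_false]
      exact ih

-- ===== VERDICT (by name: the statement is the Claim_ definition above) =====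
theorem parse_default_route_spec : Claim_equal_parse_default_route := by
  intro output _
  show parse_default_route output = parse_default_route_alt output
  simp only [parse_default_route, parse_default_route_alt]
  exact pdr_lines_eq _
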